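-- pv_equiv track=rewrite | github.com/nardos322/algoritmos1 | python/practica6.py | peso_pino
-- ===== SOURCE A (Python) =====
-- def peso_pino(altura: int) -> int:
--     peso: int = 0
--     for i in range(1,altura+1):
--
--        if i <= 3:
--            peso = i*100 * 3
--        else:
--            peso += 1*100 * 2
--     return peso
-- ===== SOURCE B (Python) =====
-- def peso_pino(altura: int) -> int:
--     # Closed form: the loop overwrites peso while i<=3 (ending at 900 once
--     # altura>=3) and adds 200 per extra metre thereafter.
--     if altura <= 0:
--         return 0
--     if altura <= 3:
--         return altura * 300
--     return 900 + 200 * (altura - 3)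
-- ===== Notes on version B (the rewrite author's own statement) =====
-- stated objective: faster
-- what changed: Replaced the O(altura) accumulation loop by the closed-form piecewise formula 0 / altura*300 / 900+200*(altura-3).
import Mathlib
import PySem

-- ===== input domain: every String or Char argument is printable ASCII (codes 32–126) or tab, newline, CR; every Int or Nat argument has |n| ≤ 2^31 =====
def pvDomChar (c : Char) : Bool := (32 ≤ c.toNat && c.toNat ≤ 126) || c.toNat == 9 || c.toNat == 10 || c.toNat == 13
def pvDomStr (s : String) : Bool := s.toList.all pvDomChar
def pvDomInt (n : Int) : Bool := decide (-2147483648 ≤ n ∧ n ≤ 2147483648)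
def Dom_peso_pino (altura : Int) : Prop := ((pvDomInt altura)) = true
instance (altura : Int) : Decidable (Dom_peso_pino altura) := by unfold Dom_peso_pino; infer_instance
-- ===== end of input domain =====

-- B replaces A's O(altura) accumulation loop by the closed-form piecewise formula (objective: faster).


-- ===== PORT A =====
def peso_pino (altura : Int) : Int :=
  (PySem.List.pyRange 1 (altura + 1) 1).foldl
    (fun peso i => if i ≤ 3 then i * 100 * 3 else peso + 1 * 100 * 2) 0

-- ===== PORT B =====
def peso_pino_alt (altura : Int) : Int :=
  if altura ≤ 0 then 0
  else if altura ≤ 3 then altura * 300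
  else 900 + 200 * (altura - 3)

-- ===== PRECONDITION & SPEC =====
def Spec_peso_pino (altura : Int) (out : Int) : Prop := out = peso_pino_alt altura
instance (altura : Int) (out : Int) : Decidable (Spec_peso_pino altura out) := by unfold Spec_peso_pino; infer_instance

-- ===== CLAIM (what is proved, stated in full; the proofs are below) =====
def Claim_equal_peso_pino : Prop := ∀ (altura : Int), Dom_peso_pino altura → Spec_peso_pino altura (peso_pino altura)

-- ===== LEMMAS AND PROOFS =====
def pvStep (peso i : Int) : Int := if i ≤ 3 then i * 100 * 3 else peso + 1 * 100 * 2

lemma pvLoop_eq (n : Nat) :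
    ((List.range n).map (fun k : Nat => (1 : Int) + (k : Int))).foldl pvStep 0 =
      (if (n : Int) ≤ 3 then (n : Int) * 300 else 900 + 200 * ((n : Int) - 3)) := by
  induction n with
  | zero => simp
  | succ m ih =>
    rw [List.range_succ, List.map_append, List.foldl_append, ih]
    simp only [List.map_cons, List.map_nil, List.foldl_cons, List.foldl_nil, pvStep]
    push_cast
    split_ifs <;> omega

theorem peso_pino_spec : Claim_equal_peso_pino := by
  intro altura _
  unfold Spec_peso_pino peso_pino peso_pino_alt
  rw [PySem.List.pyRange_one]
  have h : altura + 1 - 1 = altura := by ring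
  rw [h]
  have := pvLoop_eq altura.toNat
  rw [show (fun peso i => if i ≤ 3 then i * 100 * 3 else peso + 1 * 100 * 2) = pvStep from rfl, this]
  by_cases hle : altura ≤ 0
  · have h0 : altura.toNat = 0 := Int.toNat_of_nonpos hle
    simp [h0, hle]
  · have hn : (altura.toNat : Int) = altura := Int.toNat_of_nonneg (by omega)
    rw [hn]
    split_ifs <;> omega
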